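-- pv_equiv track=rewrite | github.com/ep4518/AoC | 2024/Day07/day7.py | recurse2
-- ===== SOURCE A (Python) =====
-- from typing import List
--
-- def recurse2(rem: List[int], tot):
--     if not rem:
--         return [tot]
--
--     n = rem.pop()
--
--     if tot == 0:
--         return recurse2(rem.copy(), n)
--
--     cat = int(str(tot) + str(n))
--
--     return recurse2(rem.copy(), tot * n) + recurse2(rem.copy(), tot + n) + recurse2(rem.copy(), cat)
-- ===== SOURCE B (Python) =====
-- from typing import List
--
-- def recurse2(rem: List[int], tot):
--     # Level-order (breadth-first) expansion instead of A's DFS recursion.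
--     # Reproduces A's single observable mutation: one pop of rem's last element.
--     if not rem:
--         return [tot]
--     n = rem.pop()
--     totals = [tot]
--     for m in [n] + rem[::-1]:
--         new = []
--         for t in totals:
--             if t == 0:
--                 new.append(m)
--             else:
--                 new.extend([t * m, t + m, int(str(t) + str(m))])
--         totals = new
--     return totals
-- ===== Notes on version B (the rewrite author's own statement) =====
-- stated objective: alternative
-- what changed: Replaced A's depth-first recursion (pop + three recursive calls concatenated) by an iterative level-order expansion: one loop over the numbers in pop order, rewriting a running list of totals; order is preserved because all leaves have the same depth.
import Mathlib
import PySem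

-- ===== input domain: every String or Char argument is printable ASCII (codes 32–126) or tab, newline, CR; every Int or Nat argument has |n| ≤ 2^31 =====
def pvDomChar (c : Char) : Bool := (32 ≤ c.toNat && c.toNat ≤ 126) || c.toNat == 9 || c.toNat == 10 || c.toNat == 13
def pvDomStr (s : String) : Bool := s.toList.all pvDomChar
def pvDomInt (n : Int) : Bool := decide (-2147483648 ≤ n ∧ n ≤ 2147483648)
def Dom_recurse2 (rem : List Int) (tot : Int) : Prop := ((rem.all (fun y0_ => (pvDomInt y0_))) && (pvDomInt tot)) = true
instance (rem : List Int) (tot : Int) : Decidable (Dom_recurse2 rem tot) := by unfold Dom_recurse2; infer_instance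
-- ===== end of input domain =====

-- B replaces A's depth-first recursion by an iterative level-order expansion (equal output;
-- A pops the caller's list once, B performs the same single mutation — return values are what is proved).

-- int(str(tot) + str(n)): digit concatenation; none (Python ValueError) is outside Pre_, .getD 0 is never used there
def pvCat (tot n : Int) : Int :=
  (PySem.Int.ofStr? (PySem.Int.toStr tot ++ PySem.Int.toStr n)).getD 0

-- ===== PORT A =====
def recurse2 (rem : List Int) (tot : Int) : List Int :=
  match h : rem.getLast? with
  | none => [tot]
  | some n =>
    if tot = 0 then recurse2 rem.dropLast n
    else recurse2 rem.dropLast (tot * n) ++ recurse2 rem.dropLast (tot + n) ++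
         recurse2 rem.dropLast (pvCat tot n)
termination_by rem.length
decreasing_by
  all_goals
    cases rem with
    | nil => simp at h
    | cons a l => simp [List.length_dropLast]

-- ===== PORT B =====
def recurse2_alt (rem : List Int) (tot : Int) : List Int :=
  match rem.getLast? with
  | none => [tot]
  | some n =>
    (n :: rem.dropLast.reverse).foldl
      (fun totals m =>
        totals.flatMap (fun t => if t = 0 then [m] else [t * m, t + m, pvCat t m]))
      [tot]

-- ===== PRECONDITION & SPEC =====
-- Pre_ excludes exactly the inputs on which A raises ValueError from int(str(tot)+str(n)): those where
-- some element, taken in pop order (reversed rem), is negative and is combined with a nonzero running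
-- total, i.e. is negative without tot and all elements popped before it being zero.
def Pre_recurse2 (rem : List Int) (tot : Int) : Prop :=
  ∀ i : Fin rem.reverse.length, rem.reverse.get i < 0 →
    tot = 0 ∧ ∀ j : Fin rem.reverse.length, j.1 < i.1 → rem.reverse.get j = 0
instance (rem : List Int) (tot : Int) : Decidable (Pre_recurse2 rem tot) := by
  unfold Pre_recurse2; infer_instance

def pvWitness_recurse2 : List Int × Int := ([2, 3, 4], 5)

def Spec_recurse2 (rem : List Int) (tot : Int) (out : List Int) : Prop := out = recurse2_alt rem tot
instance (rem : List Int) (tot : Int) (out : List Int) : Decidable (Spec_recurse2 rem tot out) := by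
  unfold Spec_recurse2; infer_instance

-- ===== CLAIM (what is proved, stated in full; the proofs are below) =====
def Claim_equal_recurse2 : Prop := ∀ (rem : List Int) (tot : Int), Dom_recurse2 rem tot → Pre_recurse2 rem tot → Spec_recurse2 rem tot (recurse2 rem tot)

-- ===== LEMMAS AND PROOFS =====

-- one-step expansion of a total by the next number
def pvExpand (m t : Int) : List Int := if t = 0 then [m] else [t * m, t + m, pvCat t m]

-- common reference form: process the numbers in pop order, depth-first
def pvRef : List Int → Int → List Int
  | [], t => [t]
  | m :: ms, t => (pvExpand m t).flatMap (pvRef ms)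

theorem recurse2_eq_ref (ms : List Int) (tot : Int) :
    recurse2 ms.reverse tot = pvRef ms tot := by
  induction ms generalizing tot with
  | nil => simp [recurse2, pvRef]
  | cons m ms ih =>
    have hl : (m :: ms).reverse = ms.reverse ++ [m] := by simp
    rw [hl, recurse2]
    split
    · next h => simp at h
    · next n h =>
      rw [List.getLast?_concat] at h
      obtain rfl : n = m := by injection h with h; exact h.symm
      simp only [List.dropLast_concat]
      by_cases h0 : tot = 0 <;> simp [h0, pvRef, pvExpand, ih]

theorem foldl_flatMap_ref (ms : List Int) (ts : List Int) :
    ms.foldl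
      (fun totals m =>
        totals.flatMap (fun t => if t = 0 then [m] else [t * m, t + m, pvCat t m]))
      ts = ts.flatMap (pvRef ms) := by
  induction ms generalizing ts with
  | nil => simp [pvRef]
  | cons m ms ih =>
    simp only [List.foldl_cons, ih, pvRef]
    rw [List.flatMap_assoc]
    rfl

theorem recurse2_alt_eq_ref (ms : List Int) (tot : Int) :
    recurse2_alt ms.reverse tot = pvRef ms tot := by
  cases ms with
  | nil => simp [recurse2_alt, pvRef]
  | cons m ms =>
    have hl : (m :: ms).reverse = ms.reverse ++ [m] := by simp
    rw [hl, recurse2_alt]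
    simp only [List.getLast?_concat, List.dropLast_concat, List.reverse_reverse]
    rw [foldl_flatMap_ref (m :: ms) [tot]]
    simp [pvRef]

-- ===== VERDICT (by name: the statement is the Claim_ definition above) =====
theorem recurse2_spec : Claim_equal_recurse2 := by
  intro rem tot _ _
  unfold Spec_recurse2
  have h1 := recurse2_eq_ref rem.reverse tot
  have h2 := recurse2_alt_eq_ref rem.reverse tot
  rw [List.reverse_reverse] at h1 h2
  rw [h1, h2]
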